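-- pv_equiv track=rewrite | github.com/Vitordotpy/opera-es-pontuais | trabalho-final-PI.py | remover_ruido_sal_pimenta
-- ===== SOURCE A (Python) =====
-- def remover_ruido_sal_pimenta(pixels, mascara=3):
--     import copy
--
--     # Cria uma cópia da matriz de pixels
--     novos_pixels = copy.deepcopy(pixels)
--
--     # Tamanho da imagem
--     altura = len(pixels)
--     largura = len(pixels[0])
--
--     # Define o raio da mascara
--     raio_mascara = mascara // 2
--
--     # Verifica cada pixel na matriz
--     for y in range(altura):
--         for x in range(largura):
--             pixel_central = pixels[y][x]
--
--             # Cria uma lista para armazenar os valores dos pixels na mascara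
--             valores_mascara = []
--
--             # Verifica os vizinhos dentro da mascara
--             for j in range(-raio_mascara, raio_mascara + 1):
--                 for i in range(-raio_mascara, raio_mascara + 1):
--                     if 0 <= y + j < altura and 0 <= x + i < largura:
--                         valor_vizinho = pixels[y + j][x + i]
--                         valores_mascara.append(valor_vizinho)
--
--             # Calcula o valor da mediana na mascara
--             valor_mediana = sorted(valores_mascara)[len(valores_mascara) // 2]
--
--             # Se o pixel central for diferente da mediana, substitua-o pela mediana
--             if pixel_central != valor_mediana:
--                 novos_pixels[y][x] = valor_mediana
--
--     return novos_pixels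
-- ===== SOURCE B (Python) =====
-- def remover_ruido_sal_pimenta(pixels, mascara=3):
--     # Builds the output row by row (no deepcopy / in-place mutation); gathers each
--     # window with row-band and column slices instead of per-element bounds checks,
--     # and selects the median by rank counting instead of sorting the window.
--     raio = mascara // 2
--     altura = len(pixels)
--     largura = len(pixels[0])
--     saida = []
--     for y in range(altura):
--         faixa = pixels[max(0, y - raio): y + raio + 1]
--         linha = []
--         for x in range(largura):
--             janela = []
--             for lin in faixa:
--                 janela += lin[max(0, x - raio): x + raio + 1]
--             k = len(janela) // 2
--             linha.append(min(v for v in janela if sum(u <= v for u in janela) > k))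
--         saida.append(linha)
--     return saida
-- ===== Notes on version B (the rewrite author's own statement) =====
-- stated objective: alternative
-- what changed: B builds the output functionally row by row (no deepcopy + in-place writes), gathers each window with a row-band slice and per-row column slices instead of per-element bounds tests, and selects the median as the smallest window value whose <=-rank exceeds half the window size (rank-count selection) instead of sorting each window.
-- outside the precondition, e.g. on remover_ruido_sal_pimenta([[1], [2, 3]], 3): A returns [[2], [2, 3]], B returns [[2], [2]]; on remover_ruido_sal_pimenta([], 3): A raises IndexError, B raises IndexError
import Mathlib
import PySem

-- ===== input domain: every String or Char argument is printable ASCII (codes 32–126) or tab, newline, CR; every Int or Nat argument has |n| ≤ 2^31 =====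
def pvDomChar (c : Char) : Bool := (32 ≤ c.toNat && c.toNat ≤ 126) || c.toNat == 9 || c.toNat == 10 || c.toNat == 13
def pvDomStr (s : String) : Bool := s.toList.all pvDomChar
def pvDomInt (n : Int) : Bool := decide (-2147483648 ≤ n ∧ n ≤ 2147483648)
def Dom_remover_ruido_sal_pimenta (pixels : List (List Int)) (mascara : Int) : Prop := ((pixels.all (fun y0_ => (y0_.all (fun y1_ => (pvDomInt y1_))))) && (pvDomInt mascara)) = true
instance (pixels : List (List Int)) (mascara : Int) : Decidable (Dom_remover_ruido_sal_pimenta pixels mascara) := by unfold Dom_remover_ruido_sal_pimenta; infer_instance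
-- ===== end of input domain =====

-- B builds the output row by row (no copy + in-place mutation), gathers each window by
-- row-band and column slices instead of per-element bounds checks, and selects the median
-- by rank counting instead of sorting each window (objective: alternative).

-- ===== PORT A =====
-- the window-collection double loop of A (j then i, with the bounds guard)
def pvAwin (pixels : List (List Int)) (altura largura raio y x : Int) : List Int :=
  (PySem.List.pyRange (-raio) (raio + 1) 1).foldl (fun vals j =>
    (PySem.List.pyRange (-raio) (raio + 1) 1).foldl (fun vals i =>
      if 0 ≤ y + j ∧ y + j < altura ∧ 0 ≤ x + i ∧ x + i < largura then
        -- pixels[y + j][x + i]; in range whenever the guard holds on a rectangular matrix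
        vals ++ [PySem.List.pyGetD (PySem.List.pyGetD pixels (y + j) []) (x + i) 0]
      else vals) vals) []

def remover_ruido_sal_pimenta (pixels : List (List Int)) (mascara : Int) : List (List Int) :=
  -- novos_pixels = deepcopy(pixels)
  let altura : Int := PySem.List.len pixels
  let largura : Int := PySem.List.len (PySem.List.pyGetD pixels 0 [])  -- len(pixels[0]); IndexError on [] excluded by Pre_
  let raio := PySem.Int.floordiv mascara 2
  (PySem.List.pyRange 0 altura 1).foldl (fun novos y =>
    (PySem.List.pyRange 0 largura 1).foldl (fun novos x =>
      let central := PySem.List.pyGetD (PySem.List.pyGetD pixels y []) x 0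
      let vals := pvAwin pixels altura largura raio y x
      -- sorted(vals)[len(vals)//2]; IndexError on an empty window excluded by Pre_
      let med := PySem.List.pyGetD (PySem.List.sorted vals (fun v => v) false)
                   (PySem.Int.floordiv (PySem.List.len vals) 2) 0
      if central ≠ med then
        PySem.List.pySetD novos y (PySem.List.pySetD (PySem.List.pyGetD novos y []) x med)
      else novos) novos) pixels

-- ===== PORT B =====
-- min(v for v in janela if sum(u <= v for u in janela) > k); min() of an empty
-- sequence raises ValueError — unreachable under Pre_ (the window is nonempty)
def pvBmed (janela : List Int) : Int :=
  let k := PySem.Int.floordiv (PySem.List.len janela) 2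
  match PySem.List.min?
      (janela.filter (fun v => decide (k < (janela.countP (fun u => decide (u ≤ v)) : Int))))
      (fun v => v) with
  | some m => m
  | none => 0

def remover_ruido_sal_pimenta_alt (pixels : List (List Int)) (mascara : Int) : List (List Int) :=
  let raio := PySem.Int.floordiv mascara 2
  let altura : Int := PySem.List.len pixels
  let largura : Int := PySem.List.len (PySem.List.pyGetD pixels 0 [])
  (PySem.List.pyRange 0 altura 1).foldl (fun saida y =>
    let faixa := PySem.List.slice pixels (some (max 0 (y - raio))) (some (y + raio + 1))
    let linha := (PySem.List.pyRange 0 largura 1).foldl (fun linha x =>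
      let janela := faixa.foldl (fun janela lin =>
        janela ++ PySem.List.slice lin (some (max 0 (x - raio))) (some (x + raio + 1))) []
      linha ++ [pvBmed janela]) []
    saida ++ [linha]) []

-- ===== PRECONDITION & SPEC =====
-- Pre_ excludes: the empty matrix (A raises IndexError on pixels[0]); non-rectangular
-- matrices, on which A either raises IndexError or mixes first-row width with per-row
-- lengths accidentally; and a negative mascara with a nonempty first row, on which A's
-- empty window makes sorted([])[0] raise IndexError.
def Pre_remover_ruido_sal_pimenta (pixels : List (List Int)) (mascara : Int) : Prop :=
  pixels ≠ [] ∧ (∀ row ∈ pixels, row.length = (pixels.headD []).length) ∧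
    (0 ≤ mascara ∨ (pixels.headD []).length = 0)
instance (pixels : List (List Int)) (mascara : Int) : Decidable (Pre_remover_ruido_sal_pimenta pixels mascara) := by unfold Pre_remover_ruido_sal_pimenta; infer_instance

def pvWitness_remover_ruido_sal_pimenta : List (List Int) × Int := ([[9, 0, 1], [2, 3, 4], [5, 200, 7]], 3)

def Spec_remover_ruido_sal_pimenta (pixels : List (List Int)) (mascara : Int) (out : List (List Int)) : Prop := out = remover_ruido_sal_pimenta_alt pixels mascara
instance (pixels : List (List Int)) (mascara : Int) (out : List (List Int)) : Decidable (Spec_remover_ruido_sal_pimenta pixels mascara out) := by unfold Spec_remover_ruido_sal_pimenta; infer_instance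

-- ===== CLAIM (what is proved, stated in full; the proofs are below) =====
def Claim_equal_remover_ruido_sal_pimenta : Prop := ∀ (pixels : List (List Int)) (mascara : Int), Dom_remover_ruido_sal_pimenta pixels mascara → Pre_remover_ruido_sal_pimenta pixels mascara → Spec_remover_ruido_sal_pimenta pixels mascara (remover_ruido_sal_pimenta pixels mascara)


-- ===== LEMMAS AND PROOFS =====

-- canonical cell of A (the median A writes at (y, x)), in Nat coordinates
def pvCellN (pixels : List (List Int)) (mascara : Int) (y x : Nat) : Int :=
  let vals := pvAwin pixels (PySem.List.len pixels)
    (PySem.List.len (PySem.List.pyGetD pixels 0 [])) (PySem.Int.floordiv mascara 2) (y : Int) (x : Int)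
  PySem.List.pyGetD (PySem.List.sorted vals (fun v => v) false)
    (PySem.Int.floordiv (PySem.List.len vals) 2) 0

-- B's window (faixa/flatMap form of the janela loop)
def pvJan (pixels : List (List Int)) (raio y x : Int) : List Int :=
  (PySem.List.slice pixels (some (max 0 (y - raio))) (some (y + raio + 1))).flatMap
    (fun lin => PySem.List.slice lin (some (max 0 (x - raio))) (some (x + raio + 1)))

lemma pvRangeMap {α : Type} (xs : List α) (d : α) (A B : Int) (hA : 0 ≤ A)
    (hB : B ≤ (xs.length : Int)) :
    (PySem.List.pyRange A B).map (fun t => xs.getD t.toNat d)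
      = (xs.drop A.toNat).take (B.toNat - A.toNat) := by
  apply List.ext_getElem
  · simp [PySem.List.length_pyRange_one]
    omega
  · intro k h1 h2
    have hk : k < (B - A).toNat := by
      simpa [PySem.List.length_pyRange_one] using h1
    simp only [List.getElem_map, PySem.List.getElem_pyRange_one, List.getElem_take,
      List.getElem_drop]
    have h3 : (A + (k : Int)).toNat = A.toNat + k := by omega
    have h4 : A.toNat + k < xs.length := by omega
    rw [h3, List.getD_eq_getElem _ _ h4]

lemma pvFilterRange (lo hi n : Int) :
    (PySem.List.pyRange lo hi).filter (fun t => decide (0 ≤ t ∧ t < n))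
      = PySem.List.pyRange (max 0 lo) (min n hi) := by
  have hp1 : ((PySem.List.pyRange lo hi).filter
      (fun t => decide (0 ≤ t ∧ t < n))).Pairwise (· < ·) :=
    (PySem.List.pairwise_lt_pyRange_one lo hi).filter _
  have hp2 : (PySem.List.pyRange (max 0 lo) (min n hi)).Pairwise (· < ·) :=
    PySem.List.pairwise_lt_pyRange_one _ _
  have hperm : ((PySem.List.pyRange lo hi).filter
      (fun t => decide (0 ≤ t ∧ t < n))).Perm (PySem.List.pyRange (max 0 lo) (min n hi)) := by
    rw [List.perm_ext_iff_of_nodup (hp1.imp ne_of_lt) (hp2.imp ne_of_lt)]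
    intro a
    simp only [List.mem_filter, PySem.List.mem_pyRange_one, decide_eq_true_eq]
    omega
  exact List.Perm.eq_of_pairwise (fun a b _ _ h1 h2 => absurd h2 (not_lt_of_gt h1)) hp1 hp2 hperm

lemma pvFlatMapIte {α β : Type} (l : List α) (c : α → Prop) [DecidablePred c] (f : α → List β) :
    l.flatMap (fun t => if c t then f t else [])
      = (l.filter (fun t => decide (c t))).flatMap f := by
  induction l with
  | nil => rfl
  | cons a l ih =>
    by_cases hc : c a <;> simp [List.flatMap_cons, hc, ih]

lemma pvFlatMapCongr {α β : Type} (l : List α) (f g : α → List β)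
    (h : ∀ a ∈ l, f a = g a) : l.flatMap f = l.flatMap g := by
  induction l with
  | nil => rfl
  | cons a l ih =>
    simp only [List.flatMap_cons, h a (List.mem_cons_self ..),
      ih (fun b hb => h b (List.mem_cons_of_mem a hb))]

lemma pvShift (a b c : Int) :
    PySem.List.pyRange (c + a) (c + b) = (PySem.List.pyRange a b).map (fun t => c + t) := by
  rw [PySem.List.pyRange_one, PySem.List.pyRange_one, List.map_map]
  have h1 : c + b - (c + a) = b - a := by ring
  rw [h1]
  exact List.map_congr_left (fun k _ => by simp [Function.comp]; ring)

-- the column pass: A's guarded scan over i equals B's column slice of the row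
lemma pvCol (row : List Int) (r x : Int) (hr : 0 ≤ r) (hx : 0 ≤ x)
    (hx2 : x < (row.length : Int)) :
    ((PySem.List.pyRange (-r) (r + 1)).filter
        (fun i => decide (0 ≤ x + i ∧ x + i < (row.length : Int)))).map
      (fun i => PySem.List.pyGetD row (x + i) 0)
      = PySem.List.slice row (some (max 0 (x - r))) (some (x + r + 1)) := by
  have e1 : PySem.List.pyRange (x - r) (x + r + 1)
      = (PySem.List.pyRange (-r) (r + 1)).map (fun t => x + t) := by
    have h := pvShift (-r) (r + 1) x
    have h2 : x + -r = x - r := by ring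
    have h3 : x + (r + 1) = x + r + 1 := by ring
    rwa [h2, h3] at h
  have e2 : ((PySem.List.pyRange (x - r) (x + r + 1)).filter
        (fun t => decide (0 ≤ t ∧ t < (row.length : Int)))).map
      (fun t => PySem.List.pyGetD row t 0)
      = ((PySem.List.pyRange (-r) (r + 1)).filter
        (fun i => decide (0 ≤ x + i ∧ x + i < (row.length : Int)))).map
      (fun i => PySem.List.pyGetD row (x + i) 0) := by
    rw [e1, List.filter_map, List.map_map]
    rfl
  rw [← e2, pvFilterRange]
  have e3 : ((PySem.List.pyRange (max 0 (x - r)) (min (row.length : Int) (x + r + 1))).map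
      (fun t => PySem.List.pyGetD row t 0))
      = ((PySem.List.pyRange (max 0 (x - r)) (min (row.length : Int) (x + r + 1))).map
      (fun t => row.getD t.toNat 0)) := by
    apply List.map_congr_left
    intro t ht
    rw [PySem.List.mem_pyRange_one] at ht
    exact PySem.List.pyGetD_of_nonneg row 0 (by omega)
  rw [e3, pvRangeMap row 0 _ _ (by omega) (by omega),
    PySem.List.slice_toNat row (by omega : (0:Int) ≤ max 0 (x - r)) (by omega : (0:Int) ≤ x + r + 1)]
  rw [List.take_eq_take_iff]
  simp only [List.length_drop]
  omega

-- the window A collects equals B's janela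
lemma pvWinEq (pixels : List (List Int)) (r y x : Int) (W : Nat)
    (hW : ∀ row ∈ pixels, row.length = W)
    (hr : 0 ≤ r) (hy : 0 ≤ y) (hy2 : y < (pixels.length : Int))
    (hx : 0 ≤ x) (hx2 : x < (W : Int)) :
    pvAwin pixels (pixels.length : Int) (W : Int) r y x = pvJan pixels r y x := by
  unfold pvAwin pvJan
  simp only [PySem.List.foldl_append_ite, PySem.List.foldl_append_eq_flatMap, List.nil_append]
  have hcase : ∀ j ∈ PySem.List.pyRange (-r) (r + 1),
      ((PySem.List.pyRange (-r) (r + 1)).filter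
          (fun i => decide (0 ≤ y + j ∧ y + j < (pixels.length : Int) ∧ 0 ≤ x + i ∧ x + i < (W : Int)))).map
        (fun i => PySem.List.pyGetD (PySem.List.pyGetD pixels (y + j) []) (x + i) 0)
      = if 0 ≤ y + j ∧ y + j < (pixels.length : Int) then
          ((PySem.List.pyRange (-r) (r + 1)).filter
              (fun i => decide (0 ≤ x + i ∧ x + i < (W : Int)))).map
            (fun i => PySem.List.pyGetD (PySem.List.pyGetD pixels (y + j) []) (x + i) 0)
        else [] := by
    intro j _
    by_cases hj : 0 ≤ y + j ∧ y + j < (pixels.length : Int)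
    · rw [if_pos hj]
      congr 1
      apply List.filter_congr
      intro i _
      simp [hj.1, hj.2]
    · rw [if_neg hj]
      rw [List.map_eq_nil_iff, List.filter_eq_nil_iff]
      intro i _
      simp only [decide_eq_true_eq]
      tauto
  rw [pvFlatMapCongr _ _ _ hcase]
  rw [pvFlatMapIte (PySem.List.pyRange (-r) (r + 1))
      (fun j => 0 ≤ y + j ∧ y + j < (pixels.length : Int))
      (fun j => ((PySem.List.pyRange (-r) (r + 1)).filter
          (fun i => decide (0 ≤ x + i ∧ x + i < (W : Int)))).map
        (fun i => PySem.List.pyGetD (PySem.List.pyGetD pixels (y + j) []) (x + i) 0))]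
  have e1 : PySem.List.pyRange (y - r) (y + r + 1)
      = (PySem.List.pyRange (-r) (r + 1)).map (fun t => y + t) := by
    have h := pvShift (-r) (r + 1) y
    have h2 : y + -r = y - r := by ring
    have h3 : y + (r + 1) = y + r + 1 := by ring
    rwa [h2, h3] at h
  have e2 : ((PySem.List.pyRange (y - r) (y + r + 1)).filter
        (fun t => decide (0 ≤ t ∧ t < (pixels.length : Int)))).flatMap
      (fun t => ((PySem.List.pyRange (-r) (r + 1)).filter
          (fun i => decide (0 ≤ x + i ∧ x + i < (W : Int)))).map
        (fun i => PySem.List.pyGetD (PySem.List.pyGetD pixels t []) (x + i) 0))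
      = ((PySem.List.pyRange (-r) (r + 1)).filter
          (fun j => decide (0 ≤ y + j ∧ y + j < (pixels.length : Int)))).flatMap
        (fun j => ((PySem.List.pyRange (-r) (r + 1)).filter
            (fun i => decide (0 ≤ x + i ∧ x + i < (W : Int)))).map
          (fun i => PySem.List.pyGetD (PySem.List.pyGetD pixels (y + j) []) (x + i) 0)) := by
    rw [e1, List.filter_map, List.flatMap_map]
    rfl
  rw [← e2, pvFilterRange]
  have e4 : ∀ t ∈ PySem.List.pyRange (max 0 (y - r)) (min (pixels.length : Int) (y + r + 1)),
      ((PySem.List.pyRange (-r) (r + 1)).filter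
          (fun i => decide (0 ≤ x + i ∧ x + i < (W : Int)))).map
        (fun i => PySem.List.pyGetD (PySem.List.pyGetD pixels t []) (x + i) 0)
      = PySem.List.slice (pixels.getD t.toNat [])
          (some (max 0 (x - r))) (some (x + r + 1)) := by
    intro t ht
    rw [PySem.List.mem_pyRange_one] at ht
    have htn : t.toNat < pixels.length := by omega
    have hrow : PySem.List.pyGetD pixels t [] = pixels.getD t.toNat [] :=
      PySem.List.pyGetD_of_nonneg pixels [] (by omega)
    have hlen : (pixels.getD t.toNat []).length = W := by
      rw [List.getD_eq_getElem _ _ htn]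
      exact hW _ (List.getElem_mem htn)
    have hcast : ((W : Nat) : Int) = ((pixels.getD t.toNat []).length : Int) := by rw [hlen]
    rw [hrow, hcast]
    exact pvCol (pixels.getD t.toNat []) r x hr hx (by rw [hlen]; exact hx2)
  rw [pvFlatMapCongr _ _ _ e4]
  rw [← List.flatMap_map (fun t : Int => pixels.getD t.toNat [])
      (fun lin => PySem.List.slice lin (some (max 0 (x - r))) (some (x + r + 1)))]
  rw [pvRangeMap pixels [] _ _ (by omega) (by omega)]
  rw [PySem.List.slice_toNat pixels (by omega : (0:Int) ≤ max 0 (y - r))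
    (by omega : (0:Int) ≤ y + r + 1)]
  congr 1
  rw [List.take_eq_take_iff]
  simp only [List.length_drop]
  omega

-- A's median of a nonempty window equals B's rank-count selection
lemma pvMedEq (l : List Int) (hne : l ≠ []) :
    pvBmed l = PySem.List.pyGetD (PySem.List.sorted l (fun v => v) false)
      (PySem.Int.floordiv (PySem.List.len l) 2) 0 := by
  have hn : 0 < l.length := List.length_pos_iff_ne_nil.2 hne
  set s := PySem.List.sorted l (fun v => v) false with hs
  have hslen : s.length = l.length := PySem.List.length_sorted l _ _
  have hperm : s.Perm l := PySem.List.sorted_perm l _ _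
  set k := l.length / 2 with hk
  have hkn : k < l.length := Nat.div_lt_self hn (by norm_num)
  have hks : k < s.length := by omega
  have hidx : PySem.Int.floordiv (PySem.List.len l) 2 = (k : Int) := by
    rw [PySem.List.len_eq, PySem.Int.floordiv_eq_ediv_of_pos (by norm_num : (0:Int) < 2)]
    omega
  have hmono : ∀ (p q : ℕ) (hpq : p ≤ q) (hq : q < s.length),
      s[p]'(Nat.lt_of_le_of_lt hpq hq) ≤ s[q]'hq := by
    intro p q hpq hq
    exact PySem.List.sorted_id_getElem_mono l hpq (by rw [← hs]; exact hq)
  have hcntP : ∀ v : Int, List.countP (fun u => decide (u ≤ v)) s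
      = List.countP (fun u => decide (u ≤ v)) l := fun v => hperm.countP_eq _
  have f1 : k < List.countP (fun u => decide (u ≤ s[k]'hks)) l := by
    rw [← hcntP]
    have hsum : List.countP (fun u => decide (u ≤ s[k]'hks)) (s.take (k+1))
        + List.countP (fun u => decide (u ≤ s[k]'hks)) (s.drop (k+1))
        = List.countP (fun u => decide (u ≤ s[k]'hks)) s := by
      rw [← List.countP_append, List.take_append_drop]
    have h1 : List.countP (fun u => decide (u ≤ s[k]'hks)) (s.take (k+1))
        = (s.take (k+1)).length := by
      rw [List.countP_eq_length]
      intro a ha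
      rw [List.mem_iff_getElem] at ha
      obtain ⟨i, hi, hia⟩ := ha
      subst hia
      have hi' : i < k + 1 := by
        simp only [List.length_take] at hi
        omega
      simp only [List.getElem_take, decide_eq_true_eq]
      exact hmono i k (by omega) hks
    have h2 : (s.take (k+1)).length = k + 1 := by
      simp only [List.length_take]
      omega
    omega
  have f2 : ∀ v ∈ l, k < List.countP (fun u => decide (u ≤ v)) l → s[k]'hks ≤ v := by
    intro v hv hc
    by_contra hlt
    have hvlt : v < s[k]'hks := not_le.mp hlt
    have hdropz : List.countP (fun u => decide (u ≤ v)) (s.drop k) = 0 := by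
      rw [List.countP_eq_zero]
      intro a ha
      rw [List.mem_iff_getElem] at ha
      obtain ⟨i, hi, hia⟩ := ha
      subst hia
      have hi' : i < s.length - k := by
        simp only [List.length_drop] at hi
        omega
      simp only [List.getElem_drop, decide_eq_true_eq]
      intro hle
      have := hmono k (k + i) (by omega) (by omega)
      omega
    have hsum : List.countP (fun u => decide (u ≤ v)) (s.take k)
        + List.countP (fun u => decide (u ≤ v)) (s.drop k)
        = List.countP (fun u => decide (u ≤ v)) s := by
      rw [← List.countP_append, List.take_append_drop]
    have h1 : List.countP (fun u => decide (u ≤ v)) (s.take k) ≤ k :=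
      le_trans List.countP_le_length (by simp [List.length_take])
    have := hcntP v
    omega
  have htopIdx : l.length - 1 < s.length := by omega
  have htop : ∀ a ∈ l, a ≤ s[l.length - 1]'htopIdx := by
    intro a ha
    have ha' : a ∈ s := hperm.mem_iff.2 ha
    rw [List.mem_iff_getElem] at ha'
    obtain ⟨i, hi, hia⟩ := ha'
    rw [← hia]
    exact hmono i (l.length - 1) (by omega) htopIdx
  have htopl : s[l.length - 1]'htopIdx ∈ l := hperm.mem_iff.1 (List.getElem_mem htopIdx)
  have hcnttop : k < List.countP (fun u => decide (u ≤ s[l.length - 1]'htopIdx)) l := by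
    have : List.countP (fun u => decide (u ≤ s[l.length - 1]'htopIdx)) l = l.length :=
      List.countP_eq_length.2 (fun a ha => by simpa using htop a ha)
    omega
  unfold pvBmed
  simp only [hidx]
  rw [PySem.List.pyGetD_natCast, List.getD_eq_getElem _ _ hks]
  have hmedF : s[k]'hks ∈ l.filter
      (fun v => decide ((k : Int) < ((List.countP (fun u => decide (u ≤ v)) l : Nat) : Int))) := by
    refine List.mem_filter.2 ⟨hperm.mem_iff.1 (List.getElem_mem hks), ?_⟩
    simp only [decide_eq_true_eq]
    exact_mod_cast f1
  cases hmin : PySem.List.min? (l.filter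
      (fun v => decide ((k : Int) < ((List.countP (fun u => decide (u ≤ v)) l : Nat) : Int))))
      (fun v => v) with
  | none =>
    exfalso
    rw [PySem.List.min?_eq_none_iff] at hmin
    rw [hmin] at hmedF
    simp at hmedF
  | some m =>
    have hmF := PySem.List.min?_mem hmin
    have hml : m ∈ l := (List.mem_filter.1 hmF).1
    have hmp : k < List.countP (fun u => decide (u ≤ m)) l := by
      have h := (List.mem_filter.1 hmF).2
      simp only [decide_eq_true_eq] at h
      exact_mod_cast h
    have h1 : s[k]'hks ≤ m := f2 m hml hmp
    have h2 : m ≤ s[k]'hks := PySem.List.min?_isMin hmin _ hmedF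
    exact le_antisymm h2 h1

-- B's window is never empty at an in-range pixel
lemma pvJanNe (pixels : List (List Int)) (r y x : Int) (W : Nat)
    (hW : ∀ row ∈ pixels, row.length = W)
    (hr : 0 ≤ r) (hy : 0 ≤ y) (hy2 : y < (pixels.length : Int))
    (hx : 0 ≤ x) (hx2 : x < (W : Int)) :
    pvJan pixels r y x ≠ [] := by
  unfold pvJan
  intro hnil
  rw [List.flatMap_eq_nil_iff] at hnil
  have hyn : y.toNat < pixels.length := by omega
  have hmem : pixels[y.toNat] ∈
      PySem.List.slice pixels (some (max 0 (y - r))) (some (y + r + 1)) := by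
    rw [PySem.List.slice_toNat pixels (by omega) (by omega)]
    have hlt : y.toNat - (max 0 (y - r)).toNat <
        (List.take ((y + r + 1).toNat - (max 0 (y - r)).toNat)
          (List.drop (max 0 (y - r)).toNat pixels)).length := by
      simp only [List.length_take, List.length_drop]
      omega
    have hget : (List.take ((y + r + 1).toNat - (max 0 (y - r)).toNat)
        (List.drop (max 0 (y - r)).toNat pixels))[y.toNat - (max 0 (y - r)).toNat]'hlt
        = pixels[y.toNat] := by
      rw [List.getElem_take, List.getElem_drop]
      congr 1
      omega
    rw [← hget]
    exact List.getElem_mem hlt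
  have hz := hnil _ hmem
  have hlen : (pixels[y.toNat]).length = W := hW _ (List.getElem_mem hyn)
  rw [PySem.List.slice_toNat _ (by omega) (by omega)] at hz
  have : (List.take ((x + r + 1).toNat - (max 0 (x - r)).toNat)
      (List.drop (max 0 (x - r)).toNat pixels[y.toNat])).length = 0 := by
    rw [hz]
    rfl
  simp only [List.length_take, List.length_drop, hlen] at this
  omega

lemma pvSetAppend {α : Type} (A : List α) (b v : α) (B : List α) :
    (A ++ b :: B).set A.length v = A ++ v :: B := by
  induction A with
  | nil => rfl
  | cons a A ih => simp [ih]

lemma pvGetDAppend {α : Type} (A : List α) (b : α) (B : List α) (d : α) :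
    (A ++ b :: B).getD A.length d = b := by
  induction A with
  | nil => rfl
  | cons a A ih => simp only [List.cons_append, List.length_cons]
                   exact ih

-- one pixel row of A's update loop
lemma pvRowFold (f g : ℕ → Int) (row : List Int) :
    ∀ n, n ≤ row.length → (∀ (x : ℕ) (h : x < row.length), g x = row[x]) →
    (List.range n).foldl (fun acc x => if g x ≠ f x then acc.set x (f x) else acc) row
      = (List.range n).map f ++ row.drop n := by
  intro n
  induction n with
  | zero => simp
  | succ m ih =>
    intro hn hg
    rw [List.range_succ, List.foldl_append, ih (by omega) hg]
    simp only [List.foldl_cons, List.foldl_nil]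
    have hm : m < row.length := by omega
    have hdrop : row.drop m = row[m] :: row.drop (m + 1) := List.drop_eq_getElem_cons hm
    rw [List.map_append, hdrop]
    by_cases hc : g m ≠ f m
    · rw [if_pos hc]
      have hset := pvSetAppend ((List.range m).map f) (row[m]) (f m) (row.drop (m + 1))
      have hL : ((List.range m).map f).length = m := by simp
      rw [hL] at hset
      rw [hset]
      simp
    · rw [if_neg hc]
      rw [not_ne_iff] at hc
      rw [← hg m hm, hc]
      simp

-- the inner loop of A only rewrites row y
lemma pvMatFold (f g : ℕ → Int) (y : ℕ) :
    ∀ (L : List ℕ) (nov : List (List Int)), y < nov.length →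
    L.foldl (fun nov2 x => if g x ≠ f x then nov2.set y ((nov2.getD y []).set x (f x)) else nov2) nov
      = nov.set y (L.foldl (fun r x => if g x ≠ f x then r.set x (f x) else r) (nov.getD y [])) := by
  intro L
  induction L with
  | nil =>
    intro nov hy
    simp only [List.foldl_nil]
    rw [List.getD_eq_getElem _ _ hy]
    exact (List.set_getElem_self hy).symm
  | cons a L ih =>
    intro nov hy
    simp only [List.foldl_cons]
    by_cases hc : g a ≠ f a
    · rw [if_pos hc, if_pos hc]
      rw [ih _ (by simpa using hy)]
      have hy' : y < (nov.set y ((nov.getD y []).set a (f a))).length := by simpa using hy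
      rw [List.getD_eq_getElem _ _ hy', List.getElem_set_self, List.set_set]
    · rw [if_neg hc, if_neg hc, ih nov hy]

-- the whole double loop of A replaces every pixel by its cell value
lemma pvOuterFold (pixels : List (List Int)) (W : ℕ) (f : ℕ → ℕ → Int)
    (hW : ∀ row ∈ pixels, row.length = W) :
    ∀ m, m ≤ pixels.length →
    (List.range m).foldl (fun nov y =>
        (List.range W).foldl (fun nov2 x =>
          if (pixels.getD y []).getD x 0 ≠ f y x then
            nov2.set y ((nov2.getD y []).set x (f y x)) else nov2) nov) pixels
      = (List.range m).map (fun y => (List.range W).map (f y)) ++ pixels.drop m := by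
  intro m
  induction m with
  | zero => simp
  | succ m ih =>
    intro hm
    rw [List.range_succ, List.foldl_append, ih (by omega)]
    simp only [List.foldl_cons, List.foldl_nil]
    set A := (List.range m).map (fun y => (List.range W).map (f y)) with hA
    have hAlen : A.length = m := by simp [hA]
    have hmlen : m < pixels.length := by omega
    have hdrop : pixels.drop m = pixels[m] :: pixels.drop (m + 1) := List.drop_eq_getElem_cons hmlen
    have hnovlen : (A ++ pixels.drop m).length = pixels.length := by
      simp [hAlen]
      omega
    rw [pvMatFold (f m) (fun x => (pixels.getD m []).getD x 0) m _ _ (by omega)]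
    have hgetD : (A ++ pixels.drop m).getD m [] = pixels[m] := by
      conv_lhs => rw [hdrop]
      have h := pvGetDAppend A (pixels[m]) (pixels.drop (m + 1)) []
      rwa [hAlen] at h
    rw [hgetD]
    have hrowlen : (pixels[m]).length = W := hW _ (List.getElem_mem hmlen)
    have hg : ∀ (x : ℕ) (h : x < (pixels[m]).length), (pixels.getD m []).getD x 0 = pixels[m][x] := by
      intro x h
      rw [List.getD_eq_getElem _ _ hmlen, List.getD_eq_getElem _ _ h]
    rw [pvRowFold (f m) (fun x => (pixels.getD m []).getD x 0) (pixels[m]) W (by omega) hg]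
    have hdropW : (pixels[m]).drop W = [] := by
      rw [List.drop_eq_nil_iff]
      omega
    have hset := pvSetAppend A (pixels[m]) ((List.range W).map (f m)) (pixels.drop (m + 1))
    rw [hAlen] at hset
    rw [hdropW, List.append_nil, hdrop, hset, List.map_append]
    simp [hA, List.append_assoc]

-- A in canonical shape
lemma pvAShape (pixels : List (List Int)) (mascara : Int) :
    remover_ruido_sal_pimenta pixels mascara
      = (List.range pixels.length).foldl (fun nov y =>
          (List.range (pixels.getD 0 []).length).foldl (fun nov2 x =>
            if (pixels.getD y []).getD x 0 ≠ pvCellN pixels mascara y x then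
              nov2.set y ((nov2.getD y []).set x (pvCellN pixels mascara y x)) else nov2) nov) pixels := by
  unfold remover_ruido_sal_pimenta pvCellN
  simp only [PySem.List.len_eq, PySem.List.pyGetD_zero, PySem.List.pyRange_zero_nat,
    List.foldl_map, PySem.List.pyGetD_natCast, PySem.List.pySetD_natCast]

-- B in canonical shape
lemma pvBShape (pixels : List (List Int)) (mascara : Int) :
    remover_ruido_sal_pimenta_alt pixels mascara
      = (List.range pixels.length).map (fun (y : Nat) =>
          (List.range (pixels.getD 0 []).length).map (fun (x : Nat) =>
            pvBmed (pvJan pixels (PySem.Int.floordiv mascara 2) ((y : Nat) : Int) ((x : Nat) : Int)))) := by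
  unfold remover_ruido_sal_pimenta_alt pvJan
  simp only [PySem.List.foldl_append_singleton_eq_map]
  simp only [PySem.List.foldl_append_eq_flatMap, List.nil_append, PySem.List.len_eq,
    PySem.List.pyGetD_zero, PySem.List.pyRange_zero_nat, List.map_map]
  rfl

-- ===== VERDICT (by name: the statement is the Claim_ definition above) =====
theorem remover_ruido_sal_pimenta_spec : Claim_equal_remover_ruido_sal_pimenta := by
  unfold Claim_equal_remover_ruido_sal_pimenta
  intro pixels mascara hdom hpre
  obtain ⟨hne, hrect, hmw⟩ := hpre
  unfold Spec_remover_ruido_sal_pimenta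
  have hW0 : (pixels.getD 0 []).length = (pixels.headD []).length := by
    cases pixels with
    | nil => rfl
    | cons p ps => rfl
  rw [pvAShape, pvBShape, hW0]
  have hrect' : ∀ row ∈ pixels, row.length = (pixels.headD []).length := hrect
  rw [pvOuterFold pixels _ _ hrect' pixels.length (le_refl _), List.drop_length, List.append_nil]
  apply List.map_congr_left
  intro y hy
  apply List.map_congr_left
  intro x hx
  rw [List.mem_range] at hy hx
  have hWpos : 0 < (pixels.headD []).length := by omega
  have hm : 0 ≤ mascara := by
    rcases hmw with h | h
    · exact h
    · omega
  have hr : 0 ≤ PySem.Int.floordiv mascara 2 := by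
    rw [PySem.Int.floordiv_eq_ediv_of_pos (by norm_num : (0:Int) < 2)]
    omega
  unfold pvCellN
  simp only [PySem.List.len_eq, PySem.List.pyGetD_zero, hW0]
  rw [pvWinEq pixels _ _ _ _ hrect' hr (by omega) (by exact_mod_cast hy) (by omega)
    (by exact_mod_cast hx)]
  exact (pvMedEq _ (pvJanNe pixels _ _ _ _ hrect' hr (by omega) (by exact_mod_cast hy) (by omega)
    (by exact_mod_cast hx))).symm
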